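-- pv_equiv track=rewrite | github.com/harshutkarshmishra1998/RAG_QA | query/query_pipeline_v2.py | _should_attempt_decomposition
-- ===== SOURCE A (Python) =====
-- def _should_attempt_decomposition(query: str) -> bool:
--     lowered = query.lower()
--
--     triggers = [
--         " and ", " or ", " but ", " yet ",
--         " also ", " additionally ", " moreover ",
--         " furthermore ", " as well as ",
--         " then ", " after that ", " next ",
--         " followed by ",
--         " compare ", " contrast ",
--         " difference between ", " differences between ",
--         " explain and ", " describe and ",
--         " analyze and ", " evaluate and ",
--         " discuss and ",
--     ]
--
--     if query.count("?") > 1: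
--         return True
--
--     return any(t in lowered for t in triggers)
-- ===== SOURCE B (Python) =====
-- _TRIGGERS = (
--     " and ", " or ", " but ", " yet ",
--     " also ", " additionally ", " moreover ",
--     " furthermore ", " as well as ",
--     " then ", " after that ", " next ",
--     " followed by ",
--     " compare ", " contrast ",
--     " difference between ", " differences between ",
--     " explain and ", " describe and ",
--     " analyze and ", " evaluate and ",
--     " discuss and ",
-- )
--
--
-- def _should_attempt_decomposition(query: str) -> bool:
--     if query.count("?") > 1:
--         return True
--     lowered = query.lower()
--     # position-major scan: walk the string once, at each position ask
--     # whether some trigger starts exactly there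
--     for i in range(len(lowered)):
--         if any(lowered.startswith(t, i) for t in _TRIGGERS):
--             return True
--     return False
-- ===== Notes on version B (the rewrite author's own statement) =====
-- stated objective: alternative
-- what changed: The trigger-major scan any(t in lowered for t in triggers) (one full substring search per trigger) is replaced by a single position-major pass over the lowered string that at each index asks whether some trigger starts exactly there (startswith with an offset); the '?'-count guard is kept.
import Mathlib
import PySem

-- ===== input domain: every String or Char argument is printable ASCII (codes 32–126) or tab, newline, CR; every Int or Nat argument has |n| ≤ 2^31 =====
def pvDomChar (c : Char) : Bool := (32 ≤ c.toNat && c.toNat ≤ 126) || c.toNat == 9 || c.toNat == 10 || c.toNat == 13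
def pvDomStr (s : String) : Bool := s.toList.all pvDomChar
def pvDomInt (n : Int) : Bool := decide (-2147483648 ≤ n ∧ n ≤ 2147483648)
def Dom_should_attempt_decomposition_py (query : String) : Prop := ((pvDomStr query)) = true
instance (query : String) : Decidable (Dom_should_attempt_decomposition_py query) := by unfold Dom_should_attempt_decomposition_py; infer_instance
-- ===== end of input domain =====

-- B replaces the trigger-major 'any(t in lowered …)' (one full substring scan per trigger)
-- by a single position-major pass that asks at each index whether some trigger starts there
-- ('alternative' objective; same boolean result, different traversal).

-- ===== PORT A =====
def triggersA : List String :=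
  [" and ", " or ", " but ", " yet ",
   " also ", " additionally ", " moreover ",
   " furthermore ", " as well as ",
   " then ", " after that ", " next ",
   " followed by ",
   " compare ", " contrast ",
   " difference between ", " differences between ",
   " explain and ", " describe and ",
   " analyze and ", " evaluate and ",
   " discuss and "]

def should_attempt_decomposition_py (query : String) : Bool :=
  let lowered := PySem.Str.lower query
  if PySem.Str.count query "?" > 1 then true
  else triggersA.any (fun t => PySem.Str.isIn t lowered)

-- ===== PORT B =====
def triggersB : List (List Char) :=
  [" and ".toList, " or ".toList, " but ".toList, " yet ".toList,
   " also ".toList, " additionally ".toList, " moreover ".toList,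
   " furthermore ".toList, " as well as ".toList,
   " then ".toList, " after that ".toList, " next ".toList,
   " followed by ".toList,
   " compare ".toList, " contrast ".toList,
   " difference between ".toList, " differences between ".toList,
   " explain and ".toList, " describe and ".toList,
   " analyze and ".toList, " evaluate and ".toList,
   " discuss and ".toList]

-- the position-major loop: 'lowered.startswith(t, i)' ported as a prefix test on the suffix
def scanB : List Char → Bool
  | [] => false
  | c :: rest => triggersB.any (fun t => t.isPrefixOf (c :: rest)) || scanB rest

def should_attempt_decomposition_py_alt (query : String) : Bool :=
  if PySem.Str.count query "?" > 1 then true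
  else scanB (PySem.Chars.lower query.toList)

-- ===== PRECONDITION & SPEC =====
def Spec_should_attempt_decomposition_py (query : String) (out : Bool) : Prop := out = should_attempt_decomposition_py_alt query
instance (query : String) (out : Bool) : Decidable (Spec_should_attempt_decomposition_py query out) := by unfold Spec_should_attempt_decomposition_py; infer_instance

-- ===== CLAIM (what is proved, stated in full; the proofs are below) =====
def Claim_equal_should_attempt_decomposition_py : Prop := ∀ (query : String), Dom_should_attempt_decomposition_py query → Spec_should_attempt_decomposition_py query (should_attempt_decomposition_py query)

-- ===== LEMMAS AND PROOFS =====

-- the position-major scan finds exactly the triggers occurring as an infix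
lemma scanB_eq_any_infix (l : List Char) :
    scanB l = triggersB.any (fun t => decide (t <:+: l)) := by
  induction l with
  | nil => decide
  | cons c rest ih =>
    rw [scanB, ih]
    rw [Bool.eq_iff_iff]
    simp only [Bool.or_eq_true, List.any_eq_true, decide_eq_true_eq,
      List.isPrefixOf_iff_prefix, List.infix_cons_iff]
    constructor
    · rintro (⟨t, ht, h⟩ | ⟨t, ht, h⟩) <;> exact ⟨t, ht, by tauto⟩
    · rintro ⟨t, ht, h | h⟩
      · exact Or.inl ⟨t, ht, h⟩
      · exact Or.inr ⟨t, ht, h⟩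

lemma triggersB_eq : triggersB = triggersA.map String.toList := rfl

lemma isIn_str_iff (t s : String) : PySem.Str.isIn t s = true ↔ t.toList <:+: s.toList := by
  rw [PySem.Str.isIn]
  exact PySem.Chars.isIn_iff_infix _ _

theorem should_attempt_decomposition_py_spec_aux (query : String) :
    should_attempt_decomposition_py query = should_attempt_decomposition_py_alt query := by
  unfold should_attempt_decomposition_py should_attempt_decomposition_py_alt
  split
  · rfl
  · rw [scanB_eq_any_infix, triggersB_eq, Bool.eq_iff_iff]
    simp only [List.any_eq_true, List.mem_map, decide_eq_true_eq]
    constructor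
    · rintro ⟨t, ht, h⟩
      refine ⟨t.toList, ⟨t, ht, rfl⟩, ?_⟩
      rw [isIn_str_iff, PySem.Str.toList_lower] at h
      exact h
    · rintro ⟨t', ⟨t, ht, rfl⟩, h⟩
      refine ⟨t, ht, ?_⟩
      rw [isIn_str_iff, PySem.Str.toList_lower]
      exact h

-- ===== VERDICT (by name: the statement is the Claim_ definition above) =====
theorem should_attempt_decomposition_py_spec : Claim_equal_should_attempt_decomposition_py := by
  intro query _
  exact should_attempt_decomposition_py_spec_aux query
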